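-- pv_equiv track=rewrite | github.com/dennyjj/COMP8090SEF_COURSE_PROJECT_14107729 | Task_2/timsort.py | _gallop_right
-- ===== SOURCE A (Python) =====
-- def _gallop_right(key, arr: list, lo: int, hi: int) -> int:
--     """
--     Use exponential search to find the position where *key* would be
--     inserted in arr[lo..hi-1], assuming arr is sorted.
--
--     First grows the search range exponentially (1, 3, 7, 15, …),
--     then narrows with binary search.  This gives O(log k) comparisons
--     where k is the distance to the insertion point.
--     """
--     if lo >= hi:
--         return lo
--     offset = 1
--     while lo + offset < hi and arr[lo + offset] < key:
--         offset *= 2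
--     # Binary search within the narrowed range
--     start = lo + offset // 2
--     end = min(lo + offset, hi)
--     while start < end:
--         mid = (start + end) // 2
--         if arr[mid] < key:
--             start = mid + 1
--         else:
--             end = mid
--     return start
-- ===== SOURCE B (Python) =====
-- def _gallop_right(key, arr: list, lo: int, hi: int) -> int:
--     """Plain binary search (bisect_left) over the whole range [lo, hi)."""
--     low, high = lo, hi
--     while low < high:
--         mid = (low + high) // 2
--         if arr[mid] < key:
--             low = mid + 1
--         else:
--             high = mid
--     return low
-- ===== Notes on version B (the rewrite author's own statement) =====
-- stated objective: simpler
-- what changed: Drops the exponential galloping phase entirely and runs one plain bisect_left binary search over the whole range [lo,hi); on the documented domain (sorted slice, in-range bounds) the insertion point is the same.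
-- outside the precondition, e.g. on _gallop_right(1, [0, 5, 0, 0], 0, 4): A returns 1, B returns 4; on _gallop_right(-1, [-3, 1, 2, 2, 3, 3], -3, 3): A returns -3, B returns 1
import Mathlib
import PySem

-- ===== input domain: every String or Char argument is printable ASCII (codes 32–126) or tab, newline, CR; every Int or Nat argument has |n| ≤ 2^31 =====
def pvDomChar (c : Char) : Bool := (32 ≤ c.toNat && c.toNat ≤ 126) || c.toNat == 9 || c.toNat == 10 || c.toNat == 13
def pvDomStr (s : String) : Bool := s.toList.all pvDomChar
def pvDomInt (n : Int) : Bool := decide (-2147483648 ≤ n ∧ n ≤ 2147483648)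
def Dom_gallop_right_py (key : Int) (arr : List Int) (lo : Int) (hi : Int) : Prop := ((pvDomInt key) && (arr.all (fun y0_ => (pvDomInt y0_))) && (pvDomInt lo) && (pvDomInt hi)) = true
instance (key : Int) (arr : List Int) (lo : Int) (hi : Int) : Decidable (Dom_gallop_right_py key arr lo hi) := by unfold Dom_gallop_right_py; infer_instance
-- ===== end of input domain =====

-- B replaces A's exponential-gallop-then-binary-search with one plain binary search over [lo,hi) (simpler); equal on the documented domain (sorted slice, in-range bounds).

-- ===== PORT A =====
-- midpoint bounds, cited by the termination proofs of both binary-search loops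
lemma pvMid_lb (s e : Int) (h : s ≤ e) : s ≤ PySem.Int.floordiv (s + e) 2 :=
  (PySem.Int.le_floordiv_iff_mul_le (by omega)).mpr (by omega)

lemma pvMid_ub (s e : Int) (h : s < e) : PySem.Int.floordiv (s + e) 2 < e :=
  (PySem.Int.floordiv_lt_iff_lt_mul (by omega)).mpr (by omega)

-- A's gallop loop: `while lo + offset < hi and arr[lo + offset] < key: offset *= 2`.
-- offset starts at 1 and only doubles, so it is carried as a Nat (exact); the
-- positivity argument is termination plumbing only.
def pvA_gallop (key : Int) (arr : List Int) (lo hi : Int) (offset : Nat) (ho : 0 < offset) : Nat :=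
  if h : lo + (offset : Int) < hi ∧ PySem.List.pyGetD arr (lo + (offset : Int)) 0 < key then
    pvA_gallop key arr lo hi (offset * 2) (by omega)
  else offset
termination_by (hi - lo - (offset : Int)).toNat
decreasing_by
  have := h.1
  have : (offset : Int) < (offset * 2 : Nat) := by push_cast; omega
  omega

-- A's inner binary search: `while start < end: mid = (start+end)//2; …`
def pvA_bsearch (key : Int) (arr : List Int) (start e : Int) : Int :=
  if h : start < e then
    let mid := PySem.Int.floordiv (start + e) 2
    if PySem.List.pyGetD arr mid 0 < key then pvA_bsearch key arr (mid + 1) e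
    else pvA_bsearch key arr start mid
  else start
termination_by (e - start).toNat
decreasing_by
  · have h1 := pvMid_lb start e (le_of_lt h); omega
  · have h2 := pvMid_ub start e h; omega

def gallop_right_py (key : Int) (arr : List Int) (lo : Int) (hi : Int) : Int :=
  if lo ≥ hi then lo
  else
    let offset := pvA_gallop key arr lo hi 1 (by omega)
    let start := lo + PySem.Int.floordiv (offset : Int) 2
    let e := min (lo + (offset : Int)) hi
    pvA_bsearch key arr start e

-- ===== PORT B =====
-- the single binary-search loop of Source B: `while low < high: mid = (low+high)//2; …`
def pvB_loop (key : Int) (arr : List Int) (low high : Int) : Int :=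
  if h : low < high then
    let mid := PySem.Int.floordiv (low + high) 2
    if PySem.List.pyGetD arr mid 0 < key then pvB_loop key arr (mid + 1) high
    else pvB_loop key arr low mid
  else low
termination_by (high - low).toNat
decreasing_by
  · have h1 := pvMid_lb low high (le_of_lt h); omega
  · have h2 := pvMid_ub low high h; omega

def gallop_right_py_alt (key : Int) (arr : List Int) (lo : Int) (hi : Int) : Int :=
  pvB_loop key arr lo hi

-- ===== PRECONDITION & SPEC =====
-- Pre_ excludes inputs A returns on for two reasons: an unsorted slice arr[lo:hi]
-- violates the function's documented assumption (both results are artefacts), and a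
-- negative lo (with lo < hi) makes A read via Python's negative-index wraparound, an
-- accident of the implementation; out-of-range reads that make A raise IndexError are
-- excluded too.  When hi ≤ lo neither program touches arr, so those inputs are all kept.
def Pre_gallop_right_py (key : Int) (arr : List Int) (lo : Int) (hi : Int) : Prop :=
  hi ≤ lo ∨ (0 ≤ lo ∧ hi ≤ (arr.length : Int) ∧ ((arr.take hi.toNat).drop lo.toNat).Pairwise (· ≤ ·))
instance (key : Int) (arr : List Int) (lo : Int) (hi : Int) : Decidable (Pre_gallop_right_py key arr lo hi) := by unfold Pre_gallop_right_py; infer_instance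

def pvWitness_gallop_right_py : Int × List Int × Int × Int := (5, [1, 3, 5, 7], 0, 4)

def Spec_gallop_right_py (key : Int) (arr : List Int) (lo : Int) (hi : Int) (out : Int) : Prop := out = gallop_right_py_alt key arr lo hi
instance (key : Int) (arr : List Int) (lo : Int) (hi : Int) (out : Int) : Decidable (Spec_gallop_right_py key arr lo hi out) := by unfold Spec_gallop_right_py; infer_instance

-- ===== CLAIM (what is proved, stated in full; the proofs are below) =====
def Claim_equal_gallop_right_py : Prop := ∀ (key : Int) (arr : List Int) (lo : Int) (hi : Int), Dom_gallop_right_py key arr lo hi → Pre_gallop_right_py key arr lo hi → Spec_gallop_right_py key arr lo hi (gallop_right_py key arr lo hi)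

-- ===== LEMMAS AND PROOFS =====


-- insertion-point postcondition shared by both binary-search loops
def pvPost (key : Int) (arr : List Int) (lo hi r : Int) : Prop :=
  lo ≤ r ∧ r ≤ hi ∧ (r = lo ∨ PySem.List.pyGetD arr (r - 1) 0 < key) ∧
    (r = hi ∨ ¬ PySem.List.pyGetD arr r 0 < key)

-- the Pairwise slice hypothesis of Pre_, read through pyGetD
lemma pvSorted_get (arr : List Int) (lo hi : Int) (h0 : 0 ≤ lo) (hlen : hi ≤ (arr.length : Int))
    (hp : ((arr.take hi.toNat).drop lo.toNat).Pairwise (· ≤ ·)) :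
    ∀ i j : Int, lo ≤ i → i ≤ j → j < hi →
      PySem.List.pyGetD arr i 0 ≤ PySem.List.pyGetD arr j 0 := by
  intro i j hi1 hij hj
  rcases eq_or_lt_of_le hij with rfl | hlt
  · exact le_refl _
  rw [PySem.List.pyGetD_eq_getElem _ _ (by omega) (by omega),
      PySem.List.pyGetD_eq_getElem _ _ (by omega) (by omega)]
  have hget := (List.pairwise_iff_getElem).mp hp (i.toNat - lo.toNat) (j.toNat - lo.toNat)
    (by simp; omega) (by simp; omega) (by omega)
  simpa [List.getElem_drop, List.getElem_take, Nat.add_sub_cancel' (by omega : lo.toNat ≤ i.toNat),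
    Nat.add_sub_cancel' (by omega : lo.toNat ≤ j.toNat)] using hget

-- with a sorted slice the postcondition pins the result down uniquely
lemma pvPost_unique (key : Int) (arr : List Int) (lo hi : Int)
    (hs : ∀ i j : Int, lo ≤ i → i ≤ j → j < hi →
      PySem.List.pyGetD arr i 0 ≤ PySem.List.pyGetD arr j 0)
    (r1 r2 : Int) (h1 : pvPost key arr lo hi r1) (h2 : pvPost key arr lo hi r2) : r1 = r2 := by
  obtain ⟨a1, b1, c1, d1⟩ := h1
  obtain ⟨a2, b2, c2, d2⟩ := h2
  by_contra hne
  -- wlog r1 < r2 by symmetry; handle both orders explicitly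
  rcases lt_trichotomy r1 r2 with hlt | heq | hlt
  · rcases c2 with h | h; · omega
    rcases d1 with h' | h'; · omega
    exact h' (lt_of_le_of_lt (hs r1 (r2 - 1) (by omega) (by omega) (by omega)) h)
  · exact hne heq
  · rcases c1 with h | h; · omega
    rcases d2 with h' | h'; · omega
    exact h' (lt_of_le_of_lt (hs r2 (r1 - 1) (by omega) (by omega) (by omega)) h)

-- A's inner binary search establishes pvPost from its entry invariants
lemma pvA_bsearch_post (key : Int) (arr : List Int) (lo hi : Int) :
    ∀ s e : Int, lo ≤ s → s ≤ e → e ≤ hi →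
    (s = lo ∨ PySem.List.pyGetD arr (s - 1) 0 < key) →
    (e = hi ∨ ¬ PySem.List.pyGetD arr e 0 < key) →
    pvPost key arr lo hi (pvA_bsearch key arr s e) := by
  intro s e
  fun_induction pvA_bsearch key arr s e with
  | case1 s e h mid hm ih =>
    intro h1 h2 h3 hb1 hb2
    have l1 := pvMid_lb s e (le_of_lt h)
    have l2 := pvMid_ub s e h
    exact ih (by omega) (by omega) h3 (Or.inr (by simpa using hm)) hb2
  | case2 s e h mid hm ih =>
    intro h1 h2 h3 hb1 hb2
    have l1 := pvMid_lb s e (le_of_lt h)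
    have l2 := pvMid_ub s e h
    exact ih h1 (by omega) (by omega) hb1 (Or.inr hm)
  | case3 s e h =>
    intro h1 h2 h3 hb1 hb2
    have hse : s = e := by omega
    exact ⟨h1, by omega, hb1, by rw [hse]; exact hb2⟩

-- B's loop is the same recursion as A's inner binary search
lemma pvB_loop_eq (key : Int) (arr : List Int) : ∀ s e : Int,
    pvB_loop key arr s e = pvA_bsearch key arr s e := by
  intro s e
  fun_induction pvB_loop key arr s e with
  | case1 s e h mid hm ih =>
    rw [ih]; conv_rhs => rw [pvA_bsearch]
    rw [dif_pos h]
    show pvA_bsearch key arr (mid + 1) e =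
      if PySem.List.pyGetD arr mid 0 < key then pvA_bsearch key arr (mid + 1) e
      else pvA_bsearch key arr s mid
    rw [if_pos hm]
  | case2 s e h mid hm ih =>
    rw [ih]; conv_rhs => rw [pvA_bsearch]
    rw [dif_pos h]
    show pvA_bsearch key arr s mid =
      if PySem.List.pyGetD arr mid 0 < key then pvA_bsearch key arr (mid + 1) e
      else pvA_bsearch key arr s mid
    rw [if_neg hm]
  | case3 s e h => rw [pvA_bsearch, dif_neg h]

-- exit facts of A's gallop loop
lemma pvA_gallop_post (key : Int) (arr : List Int) (lo hi : Int) :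
    ∀ (o : Nat) (ho : 0 < o),
    o ≤ pvA_gallop key arr lo hi o ho ∧
    (pvA_gallop key arr lo hi o ho = o ∨
      (lo + ((pvA_gallop key arr lo hi o ho / 2 : Nat) : Int) < hi ∧
       PySem.List.pyGetD arr (lo + ((pvA_gallop key arr lo hi o ho / 2 : Nat) : Int)) 0 < key)) ∧
    ¬ (lo + (pvA_gallop key arr lo hi o ho : Int) < hi ∧
       PySem.List.pyGetD arr (lo + (pvA_gallop key arr lo hi o ho : Int)) 0 < key) := by
  intro o ho
  fun_induction pvA_gallop key arr lo hi o ho with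
  | case1 o ho h ih =>
    obtain ⟨i1, i2, i3⟩ := ih
    refine ⟨by omega, Or.inr ?_, i3⟩
    rcases i2 with heq | hx
    · rw [heq]; simpa [Nat.mul_div_cancel_left] using h
    · exact hx
  | case2 o ho h =>
    exact ⟨le_refl o, Or.inl rfl, h⟩

-- ===== VERDICT (by name: the statement is the Claim_ definition above) =====
theorem gallop_right_py_spec : Claim_equal_gallop_right_py := by
  intro key arr lo hi _dom hpre
  unfold Spec_gallop_right_py gallop_right_py gallop_right_py_alt
  by_cases hlh : lo ≥ hi
  · rw [if_pos hlh, pvB_loop, dif_neg (by omega)]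
  · rw [if_neg hlh]
    have hlh2 : lo < hi := by omega
    rcases hpre with h | ⟨h0, hlen, hp⟩
    · omega
    have hs := pvSorted_get arr lo hi h0 hlen hp
    obtain ⟨hof1, hof2, hof3⟩ := pvA_gallop_post key arr lo hi 1 (by omega)
    set f := pvA_gallop key arr lo hi 1 (by omega) with hfdef
    have hfd : PySem.Int.floordiv (f : Int) 2 = ((f / 2 : Nat) : Int) := by
      exact_mod_cast PySem.Int.floordiv_natCast f 2
    rw [pvB_loop_eq]
    show pvA_bsearch key arr (lo + PySem.Int.floordiv (f : Int) 2) (min (lo + (f : Int)) hi)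
        = pvA_bsearch key arr lo hi
    rw [hfd]
    have hdle : (f / 2 : Nat) ≤ f := Nat.div_le_self f 2
    -- entry invariants for A's narrowed binary search
    have hshi : lo + ((f / 2 : Nat) : Int) ≤ hi := by
      rcases hof2 with heq | ⟨hx, _⟩
      · have : f / 2 = 0 := by omega
        rw [this]; push_cast; omega
      · omega
    have hb1 : lo + ((f / 2 : Nat) : Int) = lo ∨
        PySem.List.pyGetD arr (lo + ((f / 2 : Nat) : Int) - 1) 0 < key := by
      by_cases hz : f / 2 = 0
      · left; rw [hz]; push_cast; omega
      · right
        rcases hof2 with heq | ⟨hx, hg⟩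
        · exfalso; have : f = 1 := by omega
          rw [this] at hz; exact hz rfl
        · calc PySem.List.pyGetD arr (lo + ((f / 2 : Nat) : Int) - 1) 0
              ≤ PySem.List.pyGetD arr (lo + ((f / 2 : Nat) : Int)) 0 :=
                hs _ _ (by omega) (by omega) hx
            _ < key := hg
    have hb2 : min (lo + (f : Int)) hi = hi ∨
        ¬ PySem.List.pyGetD arr (min (lo + (f : Int)) hi) 0 < key := by
      by_cases hge : hi ≤ lo + (f : Int)
      · left; omega
      · right
        rw [min_eq_left (by omega)]
        intro hg
        exact hof3 ⟨by omega, hg⟩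
    have postA := pvA_bsearch_post key arr lo hi (lo + ((f / 2 : Nat) : Int))
      (min (lo + (f : Int)) hi) (by omega) (by omega) (by omega) hb1 hb2
    have postB := pvA_bsearch_post key arr lo hi lo hi (le_refl lo) (by omega) (le_refl hi)
      (Or.inl rfl) (Or.inl rfl)
    exact pvPost_unique key arr lo hi hs _ _ postA postB
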